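-- pv_equiv track=rewrite | github.com/prasojojiwandono/logic | graph.py | bfg
-- ===== SOURCE A (Python) =====
-- def bfg(graph, root):
--     queue = []
--     urutan = []
--     queue.append(root)
--     while len(queue)>0:
--         current = queue.pop(0)
--         urutan.append(current)
--
--         isi = graph.get(current)
--         if isi:
--             for part_isi in isi:
--                 queue.append(part_isi)
--     return urutan
-- ===== SOURCE B (Python) =====
-- def bfg(graph, root):
--     urutan = []
--     frontier = [root]
--     while frontier:
--         urutan.extend(frontier)
--         next_level = []
--         for node in frontier:
--             isi = graph.get(node)
--             if isi:
--                 next_level.extend(isi)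
--         frontier = next_level
--     return urutan
-- ===== Notes on version B (the rewrite author's own statement) =====
-- stated objective: alternative
-- what changed: Replaces the one-node-at-a-time FIFO-queue loop (pop(0) then append children) with level-synchronous BFS: emit the whole frontier at once, then build the next level by concatenating all frontier nodes' children.
import Mathlib
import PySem

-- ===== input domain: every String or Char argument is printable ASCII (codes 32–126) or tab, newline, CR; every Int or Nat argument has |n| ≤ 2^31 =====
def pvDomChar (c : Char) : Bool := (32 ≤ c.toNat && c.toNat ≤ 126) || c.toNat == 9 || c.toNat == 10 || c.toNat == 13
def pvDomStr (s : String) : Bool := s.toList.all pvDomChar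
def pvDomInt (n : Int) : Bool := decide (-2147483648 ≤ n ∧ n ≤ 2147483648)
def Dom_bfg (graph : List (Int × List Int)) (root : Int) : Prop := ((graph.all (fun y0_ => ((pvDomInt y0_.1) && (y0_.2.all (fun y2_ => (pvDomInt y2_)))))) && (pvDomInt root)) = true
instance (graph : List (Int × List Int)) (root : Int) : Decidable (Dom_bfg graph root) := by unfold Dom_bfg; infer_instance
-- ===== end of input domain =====

-- B is level-synchronous BFS instead of A's one-node-at-a-time FIFO queue; same visit order, different loop shape.

-- ===== PORT A =====
-- graph.get(current): dict lookup = first match in the association list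
def dictGet : List (Int × List Int) → Int → Option (List Int)
  | [], _ => none
  | (k, v) :: rest, x => if k = x then some v else dictGet rest x

-- children list: the row's list if present, [] otherwise (None and [] both enqueue nothing)
def ch (graph : List (Int × List Int)) (x : Int) : List Int := (dictGet graph x).getD []

-- one closure step: add every child of every member (a PySem.Set keeps first occurrences)
def stepR (graph : List (Int × List Int)) (S : PySem.Set Int) : PySem.Set Int :=
  PySem.Set.update S (S.flatMap (ch graph))

-- n closure steps
def growN (graph : List (Int × List Int)) : Nat → List Int → List Int
  | 0, S => S
  | k + 1, S => stepR graph (growN graph k S)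

-- all nodes reachable from x (graph.length + 1 steps saturate the closure)
def reach (graph : List (Int × List Int)) (x : Int) : List Int :=
  growN graph (graph.length + 1) [x]

def maxLen (graph : List (Int × List Int)) : Nat :=
  graph.foldl (fun m p => max m p.2.length) 0

-- while len(queue)>0: current = queue.pop(0); urutan.append(current); isi = graph.get(current); if isi: queue.extend(isi)
-- (fuel is only a totality device; Pre_bfg proves it sufficient)
def bfgLoop (graph : List (Int × List Int)) : Nat → List Int → List Int → List Int
  | 0, _, urutan => urutan
  | _ + 1, [], urutan => urutan
  | fuel + 1, current :: queue, urutan =>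
    let isi := dictGet graph current
    let queue' := match isi with
      | some l => if l = [] then queue else queue ++ l
      | none => queue
    bfgLoop graph fuel queue' (urutan ++ [current])

def bfg (graph : List (Int × List Int)) (root : Int) : List Int :=
  bfgLoop graph ((maxLen graph + 1) ^ (reach graph root).length) [root] []

-- ===== PORT B =====
-- next_level = []; for node in frontier: isi = graph.get(node); if isi: next_level.extend(isi)
def nextLevel (graph : List (Int × List Int)) (frontier : List Int) : List Int :=
  frontier.foldl (fun nl node =>
    match dictGet graph node with
    | some isi => if isi = [] then nl else nl ++ isi
    | none => nl) []

-- while frontier: urutan.extend(frontier); frontier = next_level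
def bfgAltLoop (graph : List (Int × List Int)) : Nat → List Int → List Int → List Int
  | 0, _, urutan => urutan
  | _ + 1, [], urutan => urutan
  | fuel + 1, frontier@(_ :: _), urutan => bfgAltLoop graph fuel (nextLevel graph frontier) (urutan ++ frontier)

def bfg_alt (graph : List (Int × List Int)) (root : Int) : List Int :=
  bfgAltLoop graph ((reach graph root).length + 1) [root] []

-- ===== PRECONDITION & SPEC =====
-- Pre_bfg excludes exactly the inputs on which A never returns: graphs with a cycle reachable from
-- root (A keeps no visited set, so it re-enqueues cycle nodes forever). On every input where A
-- returns, Pre_bfg holds and B is proved to match.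
def Pre_bfg (graph : List (Int × List Int)) (root : Int) : Prop :=
  ∀ x ∈ reach graph root, ∀ y ∈ ch graph x, x ∉ reach graph y
instance (graph : List (Int × List Int)) (root : Int) : Decidable (Pre_bfg graph root) := by
  unfold Pre_bfg; infer_instance

def pvWitness_bfg : (List (Int × List Int)) × Int := ([(1, [2, 3]), (2, [3]), (3, [])], 1)

def Spec_bfg (graph : List (Int × List Int)) (root : Int) (out : List Int) : Prop := out = bfg_alt graph root
instance (graph : List (Int × List Int)) (root : Int) (out : List Int) : Decidable (Spec_bfg graph root out) := by unfold Spec_bfg; infer_instance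

-- ===== CLAIM (what is proved, stated in full; the proofs are below) =====
def Claim_equal_bfg : Prop := ∀ (graph : List (Int × List Int)) (root : Int), Dom_bfg graph root → Pre_bfg graph root → Spec_bfg graph root (bfg graph root)

-- ===== LEMMAS AND PROOFS =====

lemma mem_stepR (graph : List (Int × List Int)) (S : List Int) (z : Int) :
    z ∈ stepR graph S ↔ z ∈ S ∨ ∃ a ∈ S, z ∈ ch graph a := by
  unfold stepR
  rw [PySem.Set.mem_update, List.mem_flatMap]

lemma subset_stepR (graph : List (Int × List Int)) (S : List Int) : S ⊆ stepR graph S := by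
  intro z hz; rw [mem_stepR]; exact Or.inl hz

lemma stepR_mono (graph : List (Int × List Int)) {S T : List Int} (h : S ⊆ T) :
    stepR graph S ⊆ stepR graph T := by
  intro z hz
  rw [mem_stepR] at hz ⊢
  rcases hz with hz | ⟨a, ha, hz⟩
  · exact Or.inl (h hz)
  · exact Or.inr ⟨a, h ha, hz⟩

lemma nodup_stepR (graph : List (Int × List Int)) (S : List Int) (hS : S.Nodup) :
    (stepR graph S).Nodup := PySem.Set.nodup_update S _ hS

lemma growN_succ_subset (graph : List (Int × List Int)) (k : Nat) (S : List Int) :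
    growN graph k S ⊆ growN graph (k + 1) S := by
  show growN graph k S ⊆ stepR graph (growN graph k S)
  exact subset_stepR graph _

lemma growN_mono_fuel (graph : List (Int × List Int)) {i j : Nat} (h : i ≤ j) (S : List Int) :
    growN graph i S ⊆ growN graph j S := by
  induction j with
  | zero => simp_all
  | succ j ih =>
    rcases Nat.lt_or_ge i (j + 1) with hij | hij
    · exact fun z hz => growN_succ_subset graph j S (ih (by omega) hz)
    · have : i = j + 1 := by omega
      subst this; exact fun z hz => hz

lemma subset_growN (graph : List (Int × List Int)) (k : Nat) (S : List Int) :
    S ⊆ growN graph k S := growN_mono_fuel graph (Nat.zero_le k) S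

lemma nodup_growN (graph : List (Int × List Int)) (k : Nat) (S : List Int) (hS : S.Nodup) :
    (growN graph k S).Nodup := by
  induction k with
  | zero => exact hS
  | succ k ih => exact nodup_stepR graph _ ih

-- a node with children is a key of the graph
lemma key_of_ch (graph : List (Int × List Int)) (a : Int) (h : ch graph a ≠ []) :
    a ∈ graph.map Prod.fst := by
  unfold ch at h
  cases hd : dictGet graph a with
  | none => simp [hd] at h
  | some l =>
    clear h
    induction graph with
    | nil => simp [dictGet] at hd
    | cons p rest ih =>
      obtain ⟨k, v⟩ := p
      by_cases hk : k = a
      · simp [hk]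
      · simp [dictGet, hk] at hd
        simp [ih hd]

-- key-count pigeonhole: two monotone-filter lemmas
lemma filter_len_mono (l : List Int) (p q : Int → Bool) (h : ∀ x ∈ l, p x → q x) :
    (l.filter p).length ≤ (l.filter q).length := by
  induction l with
  | nil => simp
  | cons a l ih =>
    have ih' := ih (fun x hx => h x (by simp [hx]))
    by_cases hp : p a
    · have hq : q a := h a (by simp) hp
      simp [hp, hq]; omega
    · by_cases hq : q a <;> simp [hp, hq] <;> omega

lemma filter_len_strict (l : List Int) (p q : Int → Bool) (h : ∀ x ∈ l, p x → q x)
    (a : Int) (ha : a ∈ l) (hqa : q a) (hpa : ¬ p a) :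
    (l.filter p).length < (l.filter q).length := by
  induction l with
  | nil => simp at ha
  | cons b l ih =>
    rcases List.mem_cons.mp ha with rfl | ha'
    · have := filter_len_mono l p q (fun x hx => h x (by simp [hx]))
      simp [hpa, hqa]; omega
    · have ih' := ih (fun x hx => h x (by simp [hx])) ha'
      by_cases hp : p b
      · have hq : q b := h b (by simp) hp
        simp [hp, hq]; omega
      · by_cases hq : q b <;> simp [hp, hq] <;> omega

-- saturation: after graph.length+1 steps the grown set is closed under ch
def StableAt (graph : List (Int × List Int)) (S : List Int) (k : Nat) : Prop :=
  ∀ a ∈ graph.map Prod.fst, a ∈ growN graph (k + 1) S → a ∈ growN graph k S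

lemma stable_step (graph : List (Int × List Int)) (S : List Int) (k : Nat)
    (h : StableAt graph S k) : growN graph (k + 2) S ⊆ growN graph (k + 1) S := by
  intro z hz
  have hz' : z ∈ stepR graph (growN graph (k + 1) S) := hz
  rw [mem_stepR] at hz'
  rcases hz' with hz' | ⟨a, ha, hz'⟩
  · exact hz'
  · have hkey : a ∈ graph.map Prod.fst := key_of_ch graph a (by intro hnil; rw [hnil] at hz'; simp at hz')
    have ha' : a ∈ growN graph k S := h a hkey ha
    show z ∈ stepR graph (growN graph k S)
    rw [mem_stepR]; exact Or.inr ⟨a, ha', hz'⟩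

lemma stable_propagate (graph : List (Int × List Int)) (S : List Int) (k : Nat)
    (h : StableAt graph S k) : ∀ m, growN graph (k + 1 + m) S ⊆ growN graph (k + 1) S := by
  intro m
  induction m with
  | zero => exact fun z hz => hz
  | succ m ih =>
    have : growN graph (k + 1 + (m + 1)) S = stepR graph (growN graph (k + 1 + m) S) := rfl
    rw [this]
    intro z hz
    have h1 : stepR graph (growN graph (k + 1 + m) S) ⊆ stepR graph (growN graph (k + 1) S) :=
      stepR_mono graph ih
    exact stable_step graph S k h (h1 hz)

lemma exists_stable (graph : List (Int × List Int)) (S : List Int) :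
    ∃ k ≤ graph.length, StableAt graph S k := by
  by_contra hc
  simp only [not_exists, not_and] at hc
  set K := graph.map Prod.fst with hK
  set c := fun k => (K.filter (fun x => decide (x ∈ growN graph k S))).length with hc'
  have hstrict : ∀ k ≤ graph.length, c k < c (k + 1) := by
    intro k hk
    have hns := hc k hk
    unfold StableAt at hns
    simp only [not_forall] at hns
    obtain ⟨a, hamem, ha1, ha0⟩ := hns
    exact filter_len_strict K _ _
      (fun x _ hx => by
        simp only [decide_eq_true_eq] at hx ⊢
        exact growN_succ_subset graph k S hx)
      a hamem (by simp [ha1]) (by simp [ha0])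
  have hlow : ∀ m, m ≤ graph.length + 1 → m ≤ c m := by
    intro m
    induction m with
    | zero => omega
    | succ m ih =>
      intro hm
      have h1 := ih (by omega)
      have h2 := hstrict m (by omega)
      omega
  have hub : c (graph.length + 1) ≤ graph.length := by
    calc c (graph.length + 1) ≤ K.length := List.length_filter_le _ _
    _ = graph.length := by simp [hK]
  have := hlow (graph.length + 1) (le_refl _)
  omega

lemma reach_closed (graph : List (Int × List Int)) (x : Int) :
    ∀ a ∈ reach graph x, ∀ z ∈ ch graph a, z ∈ reach graph x := by
  intro a ha z hz
  obtain ⟨k, hk, hs⟩ := exists_stable graph [x]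
  have h1 : z ∈ growN graph (graph.length + 2) [x] := by
    show z ∈ stepR graph (growN graph (graph.length + 1) [x])
    rw [mem_stepR]; exact Or.inr ⟨a, ha, hz⟩
  have h2 : growN graph (graph.length + 2) [x] ⊆ growN graph (k + 1) [x] := by
    have := stable_propagate graph [x] k hs (graph.length + 1 - k)
    have heq : k + 1 + (graph.length + 1 - k) = graph.length + 2 := by omega
    rw [heq] at this
    exact this
  exact growN_mono_fuel graph (by omega) [x] (h2 h1)

lemma self_mem_reach (graph : List (Int × List Int)) (x : Int) : x ∈ reach graph x :=
  subset_growN graph _ [x] (by simp)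

lemma nodup_reach (graph : List (Int × List Int)) (x : Int) : (reach graph x).Nodup :=
  nodup_growN graph _ [x] (by simp)

-- soundness: members of the grown set are genuinely reachable
def Reaches (graph : List (Int × List Int)) : Int → Int → Prop :=
  Relation.ReflTransGen (fun a b => b ∈ ch graph a)

lemma growN_sound (graph : List (Int × List Int)) (k : Nat) (S : List Int) :
    ∀ z ∈ growN graph k S, ∃ s ∈ S, Reaches graph s z := by
  induction k with
  | zero => exact fun z hz => ⟨z, hz, Relation.ReflTransGen.refl⟩
  | succ k ih =>
    intro z hz
    have hz' : z ∈ stepR graph (growN graph k S) := hz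
    rw [mem_stepR] at hz'
    rcases hz' with hz' | ⟨a, ha, hz'⟩
    · exact ih z hz'
    · obtain ⟨s, hs, hr⟩ := ih a ha
      exact ⟨s, hs, Relation.ReflTransGen.tail hr hz'⟩

lemma reaches_transfer (graph : List (Int × List Int)) (y z : Int) (h : Reaches graph y z)
    (T : List Int) (hcl : ∀ a ∈ T, ∀ w ∈ ch graph a, w ∈ T) (hy : y ∈ T) : z ∈ T := by
  induction h with
  | refl => exact hy
  | tail _ hbc ih => exact hcl _ ih _ hbc

lemma reach_trans (graph : List (Int × List Int)) (a b : Int) (hb : b ∈ reach graph a) :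
    reach graph b ⊆ reach graph a := by
  intro z hz
  obtain ⟨s, hs, hr⟩ := growN_sound graph _ [b] z hz
  simp only [List.mem_singleton] at hs
  exact reaches_transfer graph s z hr _ (reach_closed graph a) (hs ▸ hb)

-- the termination rank: number of nodes reachable from x
def dph (graph : List (Int × List Int)) (x : Int) : Nat := (reach graph x).length

lemma dph_lt (graph : List (Int × List Int)) (root x y : Int) (l : List Int)
    (hpre : Pre_bfg graph root) (hroot : x ∈ reach graph root)
    (hx : dictGet graph x = some l) (hy : y ∈ l) :
    dph graph y < dph graph x := by
  have hch : y ∈ ch graph x := by simp [ch, hx, hy]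
  have hxy : x ∉ reach graph y := hpre x hroot y hch
  have hyx : y ∈ reach graph x :=
    reach_closed graph x x (self_mem_reach graph x) y hch
  have hsub : reach graph y ⊆ reach graph x := reach_trans graph x y hyx
  have hnd : (x :: reach graph y).Nodup := by
    simp [List.nodup_cons, hxy, nodup_reach]
  have hsub' : (x :: reach graph y) ⊆ reach graph x := by
    intro z hz
    rcases List.mem_cons.mp hz with hzx | hz'
    · exact hzx ▸ self_mem_reach graph x
    · exact hsub hz'
  have := (hnd.subperm hsub').length_le
  simp at this
  unfold dph
  omega

lemma queue_step (graph : List (Int × List Int)) (c : Int) (q : List Int) :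
    (match dictGet graph c with
      | some l => if l = [] then q else q ++ l
      | none => q) = q ++ ch graph c := by
  unfold ch
  cases h : dictGet graph c with
  | none => simp
  | some l =>
    by_cases hl : l = [] <;> simp [hl]

lemma nextLevel_eq (graph : List (Int × List Int)) (fr : List Int) :
    nextLevel graph fr = fr.flatMap (ch graph) := by
  unfold nextLevel
  have h : ∀ (acc : List Int),
      fr.foldl (fun nl node =>
        match dictGet graph node with
        | some isi => if isi = [] then nl else nl ++ isi
        | none => nl) acc = acc ++ fr.flatMap (ch graph) := by
    induction fr with
    | nil => simp
    | cons x xs ih =>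
      intro acc
      simp only [List.foldl_cons, List.flatMap_cons]
      rw [queue_step, ih, List.append_assoc]
  simpa using h []

lemma ch_mem (graph : List (Int × List Int)) (x y : Int) (hy : y ∈ ch graph x) :
    ∃ l, dictGet graph x = some l ∧ y ∈ l := by
  unfold ch at hy
  cases h : dictGet graph x with
  | none => simp [h] at hy
  | some l => exact ⟨l, rfl, by simpa [h] using hy⟩

lemma dictGet_mem (graph : List (Int × List Int)) (x : Int) (l : List Int)
    (h : dictGet graph x = some l) : (x, l) ∈ graph := by
  induction graph with
  | nil => simp [dictGet] at h
  | cons p rest ih =>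
    obtain ⟨k, v⟩ := p
    by_cases hk : k = x
    · simp [dictGet, hk] at h
      simp [hk, ← h]
    · simp [dictGet, hk] at h
      simp [ih h]

lemma maxLen_bound (graph : List (Int × List Int)) (p : Int × List Int) (hp : p ∈ graph) :
    p.2.length ≤ maxLen graph := by
  unfold maxLen
  have aux : ∀ (g : List (Int × List Int)) (a : Nat), p ∈ g →
      p.2.length ≤ g.foldl (fun m q => max m q.2.length) a := by
    intro g
    induction g with
    | nil => intro a h; simp at h
    | cons q rest ih =>
      intro a h
      simp only [List.foldl_cons]
      rcases List.mem_cons.mp h with h | h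
      · subst h
        have mono : ∀ (g' : List (Int × List Int)) (a b : Nat), a ≤ b →
            a ≤ g'.foldl (fun m q => max m q.2.length) b := by
          intro g'
          induction g' with
          | nil => intro a b h; simpa using h
          | cons r rs ih' => intro a b h; exact ih' a (max b r.2.length) (le_trans h (le_max_left _ _))
        exact mono rest _ _ (le_max_right _ _)
      · exact ih _ h
  exact aux graph 0 hp

-- the potential: total fuel port A still needs for a queue
def phi (graph : List (Int × List Int)) (q : List Int) : Nat :=
  (q.map (fun x => (maxLen graph + 1) ^ dph graph x)).sum

lemma phi_append (graph : List (Int × List Int)) (a b : List Int) :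
    phi graph (a ++ b) = phi graph a + phi graph b := by
  simp [phi]

lemma phi_step (graph : List (Int × List Int)) (root x : Int) (hpre : Pre_bfg graph root)
    (hroot : x ∈ reach graph root) :
    1 + phi graph (ch graph x) ≤ (maxLen graph + 1) ^ dph graph x := by
  set B := maxLen graph + 1 with hB
  cases h : dictGet graph x with
  | none =>
    have : ch graph x = [] := by simp [ch, h]
    rw [this]
    simp [phi]
    exact Nat.one_le_pow _ _ (by omega)
  | some l =>
    by_cases hl : l = []
    · have : ch graph x = [] := by simp [ch, h, hl]
      rw [this]
      simp [phi]
      exact Nat.one_le_pow _ _ (by omega)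
    · have hch : ch graph x = l := by simp [ch, h]
      have hdx1 : 1 ≤ dph graph x := by
        have := self_mem_reach graph x
        unfold dph
        cases hr : reach graph x with
        | nil => rw [hr] at this; simp at this
        | cons a t => simp
      have hlen : l.length ≤ maxLen graph := by
        simpa using maxLen_bound graph (x, l) (dictGet_mem graph x l h)
      have hsum : phi graph l ≤ l.length * B ^ (dph graph x - 1) := by
        have hb : ∀ z ∈ l.map (fun y => B ^ dph graph y), z ≤ B ^ (dph graph x - 1) := by
          intro z hz
          simp only [List.mem_map] at hz
          obtain ⟨y, hy, rfl⟩ := hz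
          have := dph_lt graph root x y l hpre hroot h hy
          exact Nat.pow_le_pow_right (by omega) (by omega)
        have := List.sum_le_card_nsmul _ _ hb
        simpa [phi] using this
      have hpow1 : 1 ≤ B ^ (dph graph x - 1) := Nat.one_le_pow _ _ (by omega)
      have key : 1 + l.length * B ^ (dph graph x - 1) ≤ B ^ dph graph x := by
        have hpow : B ^ dph graph x = B ^ (dph graph x - 1) * B := by
          rw [← pow_succ]
          congr 1
          omega
        rw [hpow]
        calc 1 + l.length * B ^ (dph graph x - 1)
            ≤ B ^ (dph graph x - 1) + l.length * B ^ (dph graph x - 1) := by omega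
          _ = (l.length + 1) * B ^ (dph graph x - 1) := by ring
          _ ≤ B * B ^ (dph graph x - 1) := Nat.mul_le_mul_right _ (by omega)
          _ = B ^ (dph graph x - 1) * B := by ring
      rw [hch]
      omega

lemma phi_flat (graph : List (Int × List Int)) (root : Int) (hpre : Pre_bfg graph root)
    (fr : List Int) (hfr : ∀ x ∈ fr, x ∈ reach graph root) :
    fr.length + phi graph (fr.flatMap (ch graph)) ≤ phi graph fr := by
  induction fr with
  | nil => simp [phi]
  | cons x xs ih =>
    have hstep := phi_step graph root x hpre (hfr x (by simp))
    have ih' := ih (fun z hz => hfr z (by simp [hz]))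
    have : phi graph (x :: xs) = (maxLen graph + 1) ^ dph graph x + phi graph xs := by
      simp [phi]
    rw [List.flatMap_cons, phi_append, this]
    simp only [List.length_cons]
    omega

lemma loop_chunk (graph : List (Int × List Int)) :
    ∀ (q1 q2 u : List Int) (f : Nat),
      bfgLoop graph (q1.length + f) (q1 ++ q2) u
        = bfgLoop graph f (q2 ++ q1.flatMap (ch graph)) (u ++ q1) := by
  intro q1
  induction q1 with
  | nil => intro q2 u f; simp
  | cons c q1 ih =>
    intro q2 u f
    have hfuel : (c :: q1).length + f = (q1.length + f) + 1 := by simp; omega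
    rw [hfuel]
    show bfgLoop graph ((q1.length + f) + 1) (c :: (q1 ++ q2)) u = _
    rw [bfgLoop]
    simp only [queue_step]
    have : (q1 ++ q2) ++ ch graph c = q1 ++ (q2 ++ ch graph c) := by simp
    rw [this, ih (q2 ++ ch graph c) (u ++ [c]) f]
    simp

lemma main_lemma (graph : List (Int × List Int)) (root : Int) (hpre : Pre_bfg graph root) :
    ∀ (fB : Nat) (fr u : List Int) (fA : Nat),
      (∀ x ∈ fr, x ∈ reach graph root ∧ dph graph x < fB) → phi graph fr ≤ fA →
      bfgLoop graph fA fr u = bfgAltLoop graph fB fr u := by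
  intro fB
  induction fB with
  | zero =>
    intro fr u fA hd _
    have hfr : fr = [] := by
      cases fr with
      | nil => rfl
      | cons x xs => exact absurd (hd x (by simp)).2 (by omega)
    subst hfr
    cases fA <;> rfl
  | succ fB ih =>
    intro fr u fA hd hphi
    cases hfr : fr with
    | nil =>
      subst hfr
      cases fA <;> rfl
    | cons x xs =>
      subst hfr
      have hmem : ∀ z ∈ x :: xs, z ∈ reach graph root := fun z hz => (hd z hz).1
      have hlen : (x :: xs).length + phi graph ((x :: xs).flatMap (ch graph)) ≤ phi graph (x :: xs) :=
        phi_flat graph root hpre (x :: xs) hmem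
      have hfA : (x :: xs).length ≤ fA := by omega
      have hsplit : fA = (x :: xs).length + (fA - (x :: xs).length) := by omega
      rw [hsplit]
      have := loop_chunk graph (x :: xs) [] u (fA - (x :: xs).length)
      rw [List.append_nil] at this
      rw [this, List.nil_append]
      show _ = bfgAltLoop graph (fB + 1) (x :: xs) u
      rw [bfgAltLoop, nextLevel_eq]
      apply ih
      · intro y hy
        rw [List.mem_flatMap] at hy
        obtain ⟨x', hx', hy'⟩ := hy
        obtain ⟨hx'root, hx'd⟩ := hd x' hx'
        obtain ⟨l, hl1, hl2⟩ := ch_mem graph x' y hy'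
        have h1 : dph graph y < dph graph x' := dph_lt graph root x' y l hpre hx'root hl1 hl2
        refine ⟨reach_closed graph root x' hx'root y hy', by omega⟩
      · omega

-- ===== VERDICT (by name: the statement is the Claim_ definition above) =====
theorem bfg_spec : Claim_equal_bfg := by
  intro graph root _ hpre
  unfold Spec_bfg bfg bfg_alt
  apply main_lemma graph root hpre
  · intro x hx
    simp only [List.mem_singleton] at hx
    rw [hx]
    exact ⟨self_mem_reach graph root, by unfold dph; omega⟩
  · have h1 : phi graph [root] = (maxLen graph + 1) ^ dph graph root := by simp [phi]
    rw [h1]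
    exact Nat.pow_le_pow_right (by omega) (le_refl _)
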